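-- pv_equiv track=rewrite | github.com/tcl326/advent-of-code-2020 | day22/crab_combat.py | parse
-- ===== SOURCE A (Python) =====
-- def parse(lines):
--     p1cards = []
--     p2cards = []
--     player = 1
--
--     for line in lines:
--         if not line:
--             player = 2
--             continue
--         if player == 1 and line.isdigit():
--             p1cards.append(int(line))
--         if player == 2 and line.isdigit():
--             p2cards.append(int(line))
--     return p1cards, p2cards
-- ===== SOURCE B (Python) =====
-- def parse(lines):
--     lines = list(lines)
--     # partition at the first falsy (blank) line; everything after it feeds p2
--     blank = next((i for i, l in enumerate(lines) if not l), None)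
--     if blank is None:
--         before, after = lines, []
--     else:
--         before, after = lines[:blank], lines[blank + 1:]
--     p1cards = [int(l) for l in before if l.isdigit()]
--     p2cards = [int(l) for l in after if l.isdigit()]
--     return p1cards, p2cards
-- ===== Notes on version B (the rewrite author's own statement) =====
-- stated objective: simpler
-- what changed: Replaced the single stateful loop with a mutable player flag by an explicit partition at the first blank line followed by two independent filtered comprehensions.
import Mathlib
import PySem

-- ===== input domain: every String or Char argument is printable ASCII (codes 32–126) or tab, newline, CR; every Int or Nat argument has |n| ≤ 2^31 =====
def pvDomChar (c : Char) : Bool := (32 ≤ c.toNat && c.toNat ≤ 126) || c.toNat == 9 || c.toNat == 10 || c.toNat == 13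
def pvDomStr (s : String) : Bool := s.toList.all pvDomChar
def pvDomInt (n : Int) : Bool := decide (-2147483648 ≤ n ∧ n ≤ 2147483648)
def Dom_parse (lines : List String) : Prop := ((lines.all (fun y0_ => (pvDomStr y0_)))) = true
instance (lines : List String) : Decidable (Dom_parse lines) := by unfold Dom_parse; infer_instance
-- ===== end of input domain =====

-- B replaces A's stateful loop (player flag) by partitioning at the first blank line and two filtered passes; objective: simpler.


-- ===== PORT A =====
-- A's for-loop with state (p1cards, p2cards, player), appends at the back, literal branch order.
def parseLoop : List String → List Int → List Int → Int → List Int × List Int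
  | [], p1, p2, _ => (p1, p2)
  | l :: rest, p1, p2, player =>
    if l = "" then parseLoop rest p1 p2 2
    else
      let p1' := if player = 1 ∧ PySem.Str.strIsdigit l then p1 ++ [(PySem.Int.ofStr? l).getD 0] else p1
      let p2' := if player = 2 ∧ PySem.Str.strIsdigit l then p2 ++ [(PySem.Int.ofStr? l).getD 0] else p2
      parseLoop rest p1' p2' player

def parse (lines : List String) : List Int × List Int :=
  parseLoop lines [] [] 1

-- ===== PORT B =====
-- [int(l) for l in seg if l.isdigit()]
def parseDigits (seg : List String) : List Int :=
  (seg.filter (fun l => PySem.Str.strIsdigit l)).map (fun l => (PySem.Int.ofStr? l).getD 0)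

def parse_alt (lines : List String) : List Int × List Int :=
  match lines.findIdx? (fun l => l = "") with
  | none => (parseDigits lines, parseDigits [])
  | some i => (parseDigits (lines.take i), parseDigits (lines.drop (i + 1)))

-- ===== PRECONDITION & SPEC =====
def Spec_parse (lines : List String) (out : List Int × List Int) : Prop := out = parse_alt lines
instance (lines : List String) (out : List Int × List Int) : Decidable (Spec_parse lines out) := by unfold Spec_parse; infer_instance

-- ===== CLAIM (what is proved, stated in full; the proofs are below) =====
def Claim_equal_parse : Prop := ∀ (lines : List String), Dom_parse lines → Spec_parse lines (parse lines)

-- ===== LEMMAS AND PROOFS =====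
theorem parseLoop_player2 (ls : List String) (p1 p2 : List Int) :
    parseLoop ls p1 p2 2 = (p1, p2 ++ parseDigits ls) := by
  induction ls generalizing p2 with
  | nil => simp [parseLoop, parseDigits]
  | cons l rest ih =>
    by_cases h : l = ""
    · subst h
      simp [parseLoop, ih, parseDigits,
        show PySem.Chars.strIsdigit ([] : List Char) = false from by decide]
    · simp only [parseLoop, if_neg h]
      by_cases hd : PySem.Chars.strIsdigit l.toList
      · simp [PySem.Str.strIsdigit, hd, ih, parseDigits]
      · simp [PySem.Str.strIsdigit, hd, ih, parseDigits]

theorem parseLoop_player1 (ls : List String) (p1 p2 : List Int) :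
    parseLoop ls p1 p2 1 =
      match ls.findIdx? (fun l => l = "") with
      | none => (p1 ++ parseDigits ls, p2)
      | some i => (p1 ++ parseDigits (ls.take i), p2 ++ parseDigits (ls.drop (i + 1))) := by
  induction ls generalizing p1 with
  | nil => simp [parseLoop, parseDigits]
  | cons l rest ih =>
    by_cases h : l = ""
    · subst h
      simp [parseLoop, List.findIdx?_cons, parseLoop_player2, parseDigits]
    · simp only [parseLoop,  List.findIdx?_cons, h, decide_false, Bool.false_eq_true,
        if_false]
      have hd2 : (if (1 : Int) = 2 ∧ PySem.Str.strIsdigit l then p2 ++ [(PySem.Int.ofStr? l).getD 0] else p2) = p2 := by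
        simp
      rw [hd2, ih]
      cases hf : rest.findIdx? (fun l => decide (l = "")) with
      | none =>
        by_cases hd : PySem.Chars.strIsdigit l.toList <;>
          simp [parseDigits, PySem.Str.strIsdigit, hd]
      | some i =>
        by_cases hd : PySem.Chars.strIsdigit l.toList <;>
          simp [parseDigits, PySem.Str.strIsdigit, hd]

-- ===== VERDICT (by name: the statement is the Claim_ definition above) =====
theorem parse_spec : Claim_equal_parse := by
  intro lines _
  unfold Spec_parse parse parse_alt
  rw [parseLoop_player1]
  cases hf : lines.findIdx? (fun l => l = "") <;> simp [parseDigits]
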